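-- pv_equiv track=rewrite | github.com/lizy1630/NewBuildMap | scrapers/richcraft_homes.py | detect_type_for_model
-- ===== SOURCE A (Python) =====
-- TYPE_HEADINGS = [
--     "Tandem", "Multi-Gen", "Bungalow Towns", "Urban Towns",
--     "Thrive Towns", "Bungalows", "Townhomes", "Single Family", "Flats",
-- ]
--
-- def detect_type_for_model(name: str, text_before: str) -> str:
--     """
--     Walk backwards through the text preceding this model name
--     and find the nearest type heading.
--     """
--     best_pos = -1
--     best_type = "Single Family"
--     for heading in TYPE_HEADINGS:
--         pos = text_before.rfind(heading)
--         if pos > best_pos: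
--             best_pos = pos
--             best_type = heading
--     return best_type
-- ===== SOURCE B (Python) =====
-- TYPE_HEADINGS = [
--     "Tandem", "Multi-Gen", "Bungalow Towns", "Urban Towns",
--     "Thrive Towns", "Bungalows", "Townhomes", "Single Family", "Flats",
-- ]
--
-- def detect_type_for_model(name: str, text_before: str) -> str:
--     """
--     Scan start positions from the end of the text backwards; at each
--     position try the headings in their given order and return the first
--     heading that starts there.  No heading anywhere -> "Single Family".
--     """
--     for i in range(len(text_before) - 1, -1, -1):
--         for heading in TYPE_HEADINGS:
--             if text_before.startswith(heading, i):
--                 return heading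
--     return "Single Family"
-- ===== Notes on version B (the rewrite author's own statement) =====
-- stated objective: alternative
-- what changed: Instead of computing rfind for every heading and keeping the argmax position, B scans start positions backwards from the end of the text and at each position tries the headings in list order, returning the first heading that starts there (ties at the same position resolve to the earlier heading in both versions).
import Mathlib
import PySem

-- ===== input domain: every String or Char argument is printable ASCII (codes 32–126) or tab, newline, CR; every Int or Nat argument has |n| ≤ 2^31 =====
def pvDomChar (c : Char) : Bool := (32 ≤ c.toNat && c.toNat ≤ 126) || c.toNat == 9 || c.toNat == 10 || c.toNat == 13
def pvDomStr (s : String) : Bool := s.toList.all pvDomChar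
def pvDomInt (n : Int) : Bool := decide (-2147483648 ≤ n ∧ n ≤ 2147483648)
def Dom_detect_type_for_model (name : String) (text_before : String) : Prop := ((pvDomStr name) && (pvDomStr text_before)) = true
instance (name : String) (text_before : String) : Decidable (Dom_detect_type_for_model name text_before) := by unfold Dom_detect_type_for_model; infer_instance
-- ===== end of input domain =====

-- B replaces the per-heading rfind/argmax pass by one backward scan over text positions
-- that tests the headings in list order at each position (objective: alternative decomposition).

def TYPE_HEADINGS : List String :=
  ["Tandem", "Multi-Gen", "Bungalow Towns", "Urban Towns",
   "Thrive Towns", "Bungalows", "Townhomes", "Single Family", "Flats"]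

-- ===== PORT A =====
def detect_type_for_model (name : String) (text_before : String) : String :=
  (TYPE_HEADINGS.foldl
    (fun (best : Int × String) (heading : String) =>
      let pos := PySem.Str.rfind text_before heading
      if pos > best.1 then (pos, heading) else best)
    ((-1 : Int), "Single Family")).2

-- ===== PORT B =====
-- inner 'for heading in TYPE_HEADINGS: if text_before.startswith(heading, i)' loop;
-- for 0 ≤ i ≤ len, Python's startswith(h, i) is exactly 'h is a prefix of the drop-i suffix'
def headingAt (t : List Char) (i : Nat) : Option String :=
  TYPE_HEADINGS.find? (fun h => PySem.Chars.startswith (t.drop i) h.toList)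

-- outer 'for i in range(len(text_before) - 1, -1, -1)' loop; fuel k scans i = k-1 … 0
def scanLoop (t : List Char) : Nat → String
  | 0 => "Single Family"
  | k+1 =>
    match headingAt t k with
    | some h => h
    | none => scanLoop t k

def detect_type_for_model_alt (name : String) (text_before : String) : String :=
  scanLoop text_before.toList text_before.toList.length

-- ===== PRECONDITION & SPEC =====
def Spec_detect_type_for_model (name : String) (text_before : String) (out : String) : Prop := out = detect_type_for_model_alt name text_before
instance (name : String) (text_before : String) (out : String) : Decidable (Spec_detect_type_for_model name text_before out) := by unfold Spec_detect_type_for_model; infer_instance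

-- ===== CLAIM (what is proved, stated in full; the proofs are below) =====
def Claim_equal_detect_type_for_model : Prop := ∀ (name : String) (text_before : String), Dom_detect_type_for_model name text_before → Spec_detect_type_for_model name text_before (detect_type_for_model name text_before)

-- ===== LEMMAS AND PROOFS =====

theorem headings_ne_nil : ∀ h ∈ TYPE_HEADINGS, h.toList ≠ [] := by decide

theorem lt_length_of_prefix_drop {t sub : List Char} {i : Nat}
    (hp : sub <+: t.drop i) (hne : sub ≠ []) : i < t.length := by
  by_contra h
  rw [List.drop_eq_nil_of_le (by omega)] at hp
  exact hne (List.prefix_nil.mp hp)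

-- characterisation of PySem's rfind scan: -1 and no match below k, or the greatest match ≤ k
theorem rfind_go_spec (s sub : List Char) (k : Nat) :
    (PySem.Chars.rfind.go s sub k = -1 ∧ ∀ i ≤ k, ¬ sub <+: s.drop i) ∨
    (∃ i : Nat, i ≤ k ∧ PySem.Chars.rfind.go s sub k = i ∧ sub <+: s.drop i ∧
      ∀ j, i < j → j ≤ k → ¬ sub <+: s.drop j) := by
  induction k with
  | zero =>
    by_cases h : sub.isPrefixOf s
    · right
      exact ⟨0, le_refl 0, by simp [PySem.Chars.rfind.go, h],
        by simpa using List.isPrefixOf_iff_prefix.mp h, fun j hj hj' => by omega⟩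
    · left
      refine ⟨by simp [PySem.Chars.rfind.go, h], ?_⟩
      intro i hi hp
      interval_cases i
      exact h (List.isPrefixOf_iff_prefix.mpr (by simpa using hp))
  | succ k ih =>
    by_cases h : sub.isPrefixOf (s.drop (k+1))
    · right
      exact ⟨k+1, le_refl _, by simp [PySem.Chars.rfind.go, h],
        List.isPrefixOf_iff_prefix.mp h, fun j hj hj' => by omega⟩
    · have hstep : PySem.Chars.rfind.go s sub (k+1) = PySem.Chars.rfind.go s sub k := by
        simp [PySem.Chars.rfind.go, h]
      have hk1 : ¬ sub <+: s.drop (k+1) := fun hp => h (List.isPrefixOf_iff_prefix.mpr hp)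
      rcases ih with ⟨hv, hnone⟩ | ⟨i, hik, hv, hp, habove⟩
      · left
        refine ⟨hstep.trans hv, fun i hi hp => ?_⟩
        rcases Nat.lt_or_ge i (k+1) with h' | h'
        · exact hnone i (by omega) hp
        · have : i = k+1 := by omega
          exact hk1 (this ▸ hp)
      · right
        refine ⟨i, by omega, hstep.trans hv, hp, fun j hj hj' hp' => ?_⟩
        rcases Nat.lt_or_ge j (k+1) with h' | h'
        · exact habove j hj (by omega) hp'
        · have : j = k+1 := by omega
          exact hk1 (this ▸ hp')

theorem rfind_spec (s sub : List Char) (hne : sub ≠ []) :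
    (PySem.Chars.rfind s sub = -1 ∧ ∀ i : Nat, ¬ sub <+: s.drop i) ∨
    (∃ i : Nat, PySem.Chars.rfind s sub = i ∧ sub <+: s.drop i ∧
      ∀ j : Nat, i < j → ¬ sub <+: s.drop j) := by
  rcases rfind_go_spec s sub s.length with ⟨hv, hnone⟩ | ⟨i, hik, hv, hp, habove⟩
  · left
    refine ⟨hv, fun i hp => ?_⟩
    rcases Nat.lt_or_ge i (s.length + 1) with h' | h'
    · exact hnone i (by omega) hp
    · rw [List.drop_eq_nil_of_le (by omega)] at hp
      exact hne (List.prefix_nil.mp hp)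
  · right
    refine ⟨i, hv, hp, fun j hj hp' => ?_⟩
    rcases Nat.lt_or_ge j (s.length + 1) with h' | h'
    · exact habove j hj (by omega) hp'
    · rw [List.drop_eq_nil_of_le (by omega)] at hp'
      exact hne (List.prefix_nil.mp hp')

-- A's loop body, named so the fold can be reasoned about
def stepA (t : String) (best : Int × String) (heading : String) : Int × String :=
  let pos := PySem.Str.rfind t heading
  if pos > best.1 then (pos, heading) else best

theorem detect_eq_fold (name t : String) :
    detect_type_for_model name t = (TYPE_HEADINGS.foldl (stepA t) ((-1 : Int), "Single Family")).2 := rfl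

theorem foldA_const (t : String) (hs : List String) (b : Int × String)
    (hb : ∀ h ∈ hs, PySem.Chars.rfind t.toList h.toList ≤ b.1) : hs.foldl (stepA t) b = b := by
  induction hs with
  | nil => rfl
  | cons g gs ih =>
    have hstep : stepA t b g = b := by
      have := hb g (by simp)
      simp [stepA]
      omega
    rw [List.foldl_cons, hstep]
    exact ih (fun h hh => hb h (by simp [hh]))

theorem foldA_argmax (t : String) (hs₁ : List String) (h : String) (hs₂ : List String)
    (b : Int × String) (hb : b.1 < PySem.Chars.rfind t.toList h.toList)
    (h1 : ∀ g ∈ hs₁, PySem.Chars.rfind t.toList g.toList < PySem.Chars.rfind t.toList h.toList)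
    (h2 : ∀ g ∈ hs₂, PySem.Chars.rfind t.toList g.toList ≤ PySem.Chars.rfind t.toList h.toList) :
    (hs₁ ++ h :: hs₂).foldl (stepA t) b = (PySem.Chars.rfind t.toList h.toList, h) := by
  induction hs₁ generalizing b with
  | nil =>
    have hstep : stepA t b h = (PySem.Chars.rfind t.toList h.toList, h) := by
      simp only [stepA, PySem.Str.rfind_eq, gt_iff_lt]
      rw [if_pos hb]
    rw [List.nil_append, List.foldl_cons, hstep]
    exact foldA_const t hs₂ _ (by simpa using h2)
  | cons g gs ih =>
    rw [List.cons_append, List.foldl_cons]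
    have hg := h1 g (by simp)
    have hstep : stepA t b g =
        if b.1 < PySem.Chars.rfind t.toList g.toList then (PySem.Chars.rfind t.toList g.toList, g) else b := by
      simp only [stepA, PySem.Str.rfind_eq, gt_iff_lt]
    rw [hstep]
    by_cases hc : b.1 < PySem.Chars.rfind t.toList g.toList
    · rw [if_pos hc]
      exact ih _ hg (fun x hx => h1 x (by simp [hx]))
    · rw [if_neg hc]
      exact ih _ hb (fun x hx => h1 x (by simp [hx]))

theorem scanLoop_none (t : List Char) (k : Nat)
    (h : ∀ j < k, headingAt t j = none) : scanLoop t k = "Single Family" := by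
  induction k with
  | zero => rfl
  | succ k ih =>
    rw [scanLoop, h k (by omega)]
    exact ih (fun j hj => h j (by omega))

theorem scanLoop_found (t : List Char) (k j : Nat) (h : String) (hj : j < k)
    (hfound : headingAt t j = some h)
    (habove : ∀ j', j < j' → headingAt t j' = none) : scanLoop t k = h := by
  induction k with
  | zero => omega
  | succ k ih =>
    rcases Nat.lt_or_ge j k with h' | h'
    · rw [scanLoop, habove k (by omega)]
      exact ih h'
    · have hjk : j = k := by omega
      subst hjk
      rw [scanLoop, hfound]

-- headingAt is none iff no heading is a prefix of the drop-i suffix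
theorem headingAt_eq_none_iff (t : List Char) (i : Nat) :
    headingAt t i = none ↔ ∀ h ∈ TYPE_HEADINGS, ¬ h.toList <+: t.drop i := by
  unfold headingAt
  rw [List.find?_eq_none]
  constructor
  · intro hall h hh hp
    exact hall h hh ((PySem.Chars.startswith_iff _ _).mpr hp)
  · intro hall h hh hs
    exact hall h hh ((PySem.Chars.startswith_iff _ _).mp hs)

theorem headingAt_none_of_ge (t : List Char) (i : Nat) (hi : t.length ≤ i) :
    headingAt t i = none := by
  rw [headingAt_eq_none_iff]
  intro h hh hp
  rw [List.drop_eq_nil_of_le hi] at hp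
  exact headings_ne_nil h hh (List.prefix_nil.mp hp)

-- ===== VERDICT (by name: the statement is the Claim_ definition above) =====
theorem detect_type_for_model_spec : Claim_equal_detect_type_for_model := by
  intro name text_before _
  show detect_type_for_model name text_before = detect_type_for_model_alt name text_before
  set t := text_before.toList with ht
  by_cases hex : ∃ j, headingAt t j ≠ none
  · -- some heading occurs somewhere: both return the first heading at the greatest position
    obtain ⟨j₀, hj₀⟩ := hex
    set J := Nat.findGreatest (fun j => headingAt t j ≠ none) t.length with hJ
    have hj₀n : j₀ ≤ t.length := by
      by_contra hc
      exact hj₀ (headingAt_none_of_ge t j₀ (by omega))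
    have hPJ : headingAt t J ≠ none :=
      Nat.findGreatest_spec (P := fun j => headingAt t j ≠ none) hj₀n hj₀
    have habove : ∀ j, J < j → headingAt t j = none := by
      intro j hj
      by_cases hjn : j ≤ t.length
      · by_contra hc
        exact Nat.findGreatest_is_greatest hj hjn hc
      · exact headingAt_none_of_ge t j (by omega)
    obtain ⟨hstar, hfound⟩ : ∃ h, headingAt t J = some h := by
      cases hc : headingAt t J with
      | none => exact absurd hc hPJ
      | some h => exact ⟨h, rfl⟩
    obtain ⟨hpred, as, bs, hdec, hprev⟩ := List.find?_eq_some_iff_append.mp hfound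
    have hstarmem : hstar ∈ TYPE_HEADINGS := by rw [hdec]; simp
    have hstarp : hstar.toList <+: t.drop J := (PySem.Chars.startswith_iff _ _).mp hpred
    have hJn : J < t.length :=
      lt_length_of_prefix_drop hstarp (headings_ne_nil _ hstarmem)
    -- B returns hstar
    have hB : detect_type_for_model_alt name text_before = hstar := by
      unfold detect_type_for_model_alt
      exact scanLoop_found t t.length J hstar hJn hfound habove
    -- rfind of hstar is exactly J
    have hrstar : PySem.Chars.rfind t hstar.toList = (J : Int) := by
      rcases rfind_spec t hstar.toList (headings_ne_nil _ hstarmem) with ⟨_, hnone⟩ | ⟨i, hv, hp, hab⟩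
      · exact absurd hstarp (hnone J)
      · have hiJ : i ≤ J := by
          by_contra hc
          exact (headingAt_eq_none_iff t i).mp (habove i (by omega)) hstar hstarmem hp
        have hJi : J ≤ i := by
          by_contra hc
          exact hab J (by omega) hstarp
        rw [hv]; congr 1; omega
    -- every heading has rfind ≤ J
    have hle : ∀ g ∈ TYPE_HEADINGS, PySem.Chars.rfind t g.toList ≤ (J : Int) := by
      intro g hg
      rcases rfind_spec t g.toList (headings_ne_nil _ hg) with ⟨hv, _⟩ | ⟨i, hv, hp, _⟩
      · rw [hv]; omega
      · have hiJ : i ≤ J := by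
          by_contra hc
          exact (headingAt_eq_none_iff t i).mp (habove i (by omega)) g hg hp
        rw [hv]; exact_mod_cast hiJ
    -- headings before hstar in the list do not match at J, so their rfind is < J
    have hlt : ∀ g ∈ as, PySem.Chars.rfind t g.toList < (J : Int) := by
      intro g hg
      have hgmem : g ∈ TYPE_HEADINGS := by rw [hdec]; simp [hg]
      rcases rfind_spec t g.toList (headings_ne_nil _ hgmem) with ⟨hv, _⟩ | ⟨i, hv, hp, _⟩
      · rw [hv]; omega
      · have hiJ : i ≤ J := by
          by_contra hc
          exact (headingAt_eq_none_iff t i).mp (habove i (by omega)) g hgmem hp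
        have hne : i ≠ J := by
          intro hc
          have hfalse := hprev g hg
          rw [Bool.not_eq_eq_eq_not, Bool.not_true] at hfalse
          rw [(PySem.Chars.startswith_iff _ _).mpr (hc ▸ hp)] at hfalse
          simp at hfalse
        rw [hv]
        exact_mod_cast Nat.lt_of_le_of_ne hiJ hne
    rw [detect_eq_fold, hdec, hB]
    rw [foldA_argmax text_before as hstar bs _
      (by rw [← ht, hrstar]; omega)
      (fun g hg => by rw [← ht, hrstar]; exact hlt g hg)
      (fun g hg => by
        rw [← ht, hrstar]
        exact hle g (by rw [hdec]; simp [hg]))]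
  · -- no heading occurs anywhere: both return the default
    simp only [not_exists, ne_eq, not_not] at hex
    have hB : detect_type_for_model_alt name text_before = "Single Family" :=
      scanLoop_none t t.length (fun j _ => hex j)
    have hA : detect_type_for_model name text_before = "Single Family" := by
      rw [detect_eq_fold]
      rw [foldA_const text_before TYPE_HEADINGS _ (by
        intro h hh
        rcases rfind_spec t h.toList (headings_ne_nil h hh) with ⟨hv, _⟩ | ⟨i, hv, hp, _⟩
        · rw [← ht, hv]
        · exact absurd hp ((headingAt_eq_none_iff t i).mp (hex i) h hh))]
    rw [hA, hB]
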